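-- pv_equiv track=rewrite | github.com/Yesikaa18/T6_IA | T6_GRASP.py | busqueda_local
-- ===== SOURCE A (Python) =====
-- def busqueda_local(K, solucion, pesos, valores, capacidad):
--     # Búsqueda local para mejorar la solución
--     mejor_solucion = list(solucion)
--     mejor_valor = sum([valores[i] for i in solucion])
--     for i in range(len(solucion)):
--         for j in range(i+1, len(solucion)):
--             vecino = list(solucion)
--             vecino[i], vecino[j] = vecino[j], vecino[i]
--             valor_vecino = sum([valores[i] for i in vecino])
--             peso_vecino = sum([pesos[i] for i in vecino])
--             if peso_vecino <= capacidad and valor_vecino > mejor_valor: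
--                 mejor_solucion = vecino
--                 mejor_valor = valor_vecino
--     return mejor_solucion, mejor_valor
-- ===== SOURCE B (Python) =====
-- def busqueda_local(K, solucion, pesos, valores, capacidad):
--     # Every "neighbor" in the original search is a transposition of `solucion`,
--     # i.e. a permutation, so its value sum equals the current best and the
--     # improvement test can never fire: the result is always the input solution
--     # and its value.  Compute that directly in one pass.
--     return list(solucion), sum(valores[i] for i in solucion)
-- ===== Notes on version B (the rewrite author's own statement) =====
-- stated objective: simpler
-- what changed: B drops the two-swap neighborhood scan entirely: swapping two positions permutes the index list, so every neighbor has the same value sum and A's improvement branch is unreachable; B returns (list(solucion), sum of values) in one pass.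
import Mathlib
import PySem

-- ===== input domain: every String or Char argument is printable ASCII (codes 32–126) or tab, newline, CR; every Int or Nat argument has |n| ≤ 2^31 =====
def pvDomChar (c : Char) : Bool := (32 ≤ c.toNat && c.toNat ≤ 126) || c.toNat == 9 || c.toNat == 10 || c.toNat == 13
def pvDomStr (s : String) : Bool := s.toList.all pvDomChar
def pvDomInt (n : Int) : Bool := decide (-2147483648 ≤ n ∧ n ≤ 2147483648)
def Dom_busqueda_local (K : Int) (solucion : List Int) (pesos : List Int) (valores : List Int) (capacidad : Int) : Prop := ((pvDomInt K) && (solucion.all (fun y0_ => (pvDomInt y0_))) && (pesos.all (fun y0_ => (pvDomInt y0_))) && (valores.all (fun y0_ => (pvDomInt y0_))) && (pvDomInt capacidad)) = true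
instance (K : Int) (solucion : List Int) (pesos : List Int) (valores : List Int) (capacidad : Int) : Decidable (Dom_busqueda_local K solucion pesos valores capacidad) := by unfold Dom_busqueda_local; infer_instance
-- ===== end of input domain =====

-- B replaces A's O(n^3) two-swap scan (whose improvement branch is provably unreachable,
-- since every neighbor is a permutation of `solucion`) by directly returning the input
-- solution and its value sum in one pass.

-- ===== PORT A =====
-- sum([valores[i] for i in xs]): pyGetD is exact under Pre_ (every index in range)
def pvSumIdxA (vs : List Int) (idxs : List Int) : Int :=
  idxs.foldl (fun acc i => acc + PySem.List.pyGetD vs i 0) 0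

def busqueda_local (K : Int) (solucion : List Int) (pesos : List Int) (valores : List Int) (capacidad : Int) : List Int × Int :=
  let mejor_valor := pvSumIdxA valores solucion
  let n := solucion.length
  (List.range n).foldl (fun st i =>
    ((List.range n).drop (i+1)).foldl (fun st j =>
      -- vecino = copy of solucion with positions i and j swapped (i, j < n, so getD defaults never fire)
      let vecino := (solucion.set i (solucion.getD j 0)).set j (solucion.getD i 0)
      let valor_vecino := pvSumIdxA valores vecino
      let peso_vecino := pvSumIdxA pesos vecino
      if peso_vecino ≤ capacidad ∧ valor_vecino > st.2 then (vecino, valor_vecino) else st)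
      st)
    (solucion, mejor_valor)

-- ===== PORT B =====
def busqueda_local_alt (K : Int) (solucion : List Int) (pesos : List Int) (valores : List Int) (capacidad : Int) : List Int × Int :=
  (solucion, solucion.foldl (fun acc i => acc + PySem.List.pyGetD valores i 0) 0)

-- ===== PRECONDITION & SPEC =====
-- Pre_: exactly where Python A returns: every index of `solucion` must be in range for
-- `valores`, and — only when a neighbor is actually formed, i.e. len(solucion) >= 2 —
-- also in range for `pesos` (Python indices may be negative).
def Pre_busqueda_local (K : Int) (solucion : List Int) (pesos : List Int) (valores : List Int) (capacidad : Int) : Prop :=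
  (∀ i ∈ solucion, PySem.Raise.InRange valores.length i) ∧
  (2 ≤ solucion.length → ∀ i ∈ solucion, PySem.Raise.InRange pesos.length i)
instance (K : Int) (solucion : List Int) (pesos : List Int) (valores : List Int) (capacidad : Int) : Decidable (Pre_busqueda_local K solucion pesos valores capacidad) := by unfold Pre_busqueda_local; infer_instance

def pvWitness_busqueda_local : Int × List Int × List Int × List Int × Int := (0, [0, 1], [2, 3], [4, 5], 10)

def Spec_busqueda_local (K : Int) (solucion : List Int) (pesos : List Int) (valores : List Int) (capacidad : Int) (out : List Int × Int) : Prop := out = busqueda_local_alt K solucion pesos valores capacidad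
instance (K : Int) (solucion : List Int) (pesos : List Int) (valores : List Int) (capacidad : Int) (out : List Int × Int) : Decidable (Spec_busqueda_local K solucion pesos valores capacidad out) := by unfold Spec_busqueda_local; infer_instance

-- ===== CLAIM (what is proved, stated in full; the proofs are below) =====
def Claim_equal_busqueda_local : Prop := ∀ (K : Int) (solucion : List Int) (pesos : List Int) (valores : List Int) (capacidad : Int), Dom_busqueda_local K solucion pesos valores capacidad → Pre_busqueda_local K solucion pesos valores capacidad → Spec_busqueda_local K solucion pesos valores capacidad (busqueda_local K solucion pesos valores capacidad)


-- ===== LEMMAS AND PROOFS =====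

-- Summing an unchanged-by-swap list: (L.set i L[j]).set j L[i] has the same sum as L.
theorem pv_sum_swap (L : List Int) (i j : Nat) (hi : i < L.length) (hj : j < L.length) :
    ((L.set i L[j]).set j L[i]).sum = L.sum := by
  by_cases hij : i = j
  · subst hij; simp
  · rw [List.sum_set', List.sum_set']
    have hlen : (L.set i L[j]).length = L.length := by simp
    have hj' : j < (L.set i L[j]).length := by omega
    rw [dif_pos hj', dif_pos hi]
    have : (L.set i L[j])[j] = L[j] := by
      rw [List.getElem_set]; simp [hij]
    rw [this]; ring

-- A fold whose body fixes the initial state returns it.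
theorem pv_foldl_fix {α β : Type} (f : β → α → β) (b : β) (l : List α)
    (h : ∀ x ∈ l, f b x = b) : l.foldl f b = b := by
  induction l with
  | nil => rfl
  | cons x xs ih => simp only [List.foldl_cons, h x (List.mem_cons_self)]
                    exact ih (fun y hy => h y (List.mem_cons_of_mem _ hy))

theorem pv_sumIdx_eq (vs l : List Int) :
    pvSumIdxA vs l = (l.map (fun i => PySem.List.pyGetD vs i 0)).sum := by
  unfold pvSumIdxA
  rw [PySem.List.foldl_add]
  simp

-- The value sum of a swapped neighbor equals the original value sum.
theorem pv_valor_vecino (vs sol : List Int) (i j : Nat)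
    (hi : i < sol.length) (hj : j < sol.length) :
    pvSumIdxA vs ((sol.set i (sol.getD j 0)).set j (sol.getD i 0)) = pvSumIdxA vs sol := by
  rw [pv_sumIdx_eq, pv_sumIdx_eq]
  rw [List.getD_eq_getElem sol 0 hj, List.getD_eq_getElem sol 0 hi]
  rw [List.map_set, List.map_set]
  have hset : (sol.set i sol[j]).length = sol.length := by simp
  rw [List.getElem_map_rev (fun i => PySem.List.pyGetD vs i 0),
      List.getElem_map_rev (fun i => PySem.List.pyGetD vs i 0)]
  exact pv_sum_swap (sol.map (fun i => PySem.List.pyGetD vs i 0)) i j (by simpa) (by simpa)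

-- ===== VERDICT (by name: the statement is the Claim_ definition above) =====
theorem busqueda_local_spec : Claim_equal_busqueda_local := by
  intro K solucion pesos valores capacidad _ _
  unfold Spec_busqueda_local busqueda_local busqueda_local_alt
  have hB : solucion.foldl (fun acc i => acc + PySem.List.pyGetD valores i 0) 0
      = pvSumIdxA valores solucion := rfl
  rw [hB]
  apply pv_foldl_fix
  intro i hi
  apply pv_foldl_fix
  intro j hj
  have hi' : i < solucion.length := List.mem_range.mp hi
  have hj' : j < solucion.length := List.mem_range.mp (List.mem_of_mem_drop hj)
  have hv := pv_valor_vecino valores solucion i j hi' hj'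
  simp only [hv]
  rw [if_neg]
  simp
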